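-- pv_equiv track=rewrite | github.com/abdvl/JS-code-snippets | numberOfItems.py | helper
-- ===== SOURCE A (Python) =====
-- def helper(str):
--     tot_stars = 0
--     flag=0
--     pending = 0
--     for i in range(len(str)):
--         # for stars before first |
--         if(flag==0 and str[i] == '*'):
--             continue
--         # for all other stars
--         elif(str[i] == '*'):
--             pending+=1
--         # for |
--         else:
--             flag = 1
--             tot_stars+=pending
--             pending=0
--     return tot_stars
-- ===== SOURCE B (Python) =====
-- def helper(str):
--     # Stars before the first non-star and after the last non-star never count;
--     # every star in between is eventually flushed into the total.
--     trimmed = str.strip('*')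
--     return trimmed.count('*')
-- ===== Notes on version B (the rewrite author's own statement) =====
-- stated objective: simpler
-- what changed: Replaced the flag/pending state-machine loop with a closed-form string computation: strip the leading and trailing star runs with str.strip and count the stars that remain.
import Mathlib
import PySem

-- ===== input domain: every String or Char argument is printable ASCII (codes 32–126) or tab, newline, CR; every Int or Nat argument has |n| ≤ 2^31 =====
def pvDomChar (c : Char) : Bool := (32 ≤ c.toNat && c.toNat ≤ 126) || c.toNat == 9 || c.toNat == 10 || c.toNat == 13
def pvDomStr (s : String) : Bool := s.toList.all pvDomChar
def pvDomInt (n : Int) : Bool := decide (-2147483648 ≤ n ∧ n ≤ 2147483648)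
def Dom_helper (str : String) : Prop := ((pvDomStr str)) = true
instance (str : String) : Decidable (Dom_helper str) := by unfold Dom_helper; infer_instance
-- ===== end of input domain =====

-- B replaces A's flag/pending state-machine loop by str.strip('*') followed by .count('*') (objective: simpler).


-- ===== PORT A =====
-- state = (tot_stars, flag, pending); the 'for i in range(len(str)): str[i]' loop is a left fold over the characters
def helperStep (st : Int × Int × Int) (c : Char) : Int × Int × Int :=
  if st.2.1 == 0 && c == '*' then st
  else if c == '*' then (st.1, st.2.1, st.2.2 + 1)
  else (st.1 + st.2.2, 1, 0)

def helper (str : String) : Int :=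
  (str.toList.foldl helperStep (0, 0, 0)).1

-- ===== PORT B =====
def helper_alt (str : String) : Int :=
  let trimmed := PySem.Str.stripChars str "*"      -- str.strip('*')
  (PySem.Str.count trimmed "*" : Int)              -- trimmed.count('*')

-- ===== PRECONDITION & SPEC =====
def Spec_helper (str : String) (out : Int) : Prop := out = helper_alt str
instance (str : String) (out : Int) : Decidable (Spec_helper str out) := by unfold Spec_helper; infer_instance

-- ===== CLAIM (what is proved, stated in full; the proofs are below) =====
def Claim_equal_helper : Prop := ∀ (str : String), Dom_helper str → Spec_helper str (helper str)

-- ===== LEMMAS AND PROOFS =====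

-- strip the trailing star run
def rstripStar (l : List Char) : List Char := (l.reverse.dropWhile (· == '*')).reverse

theorem rstripStar_eq_nil_iff (l : List Char) : rstripStar l = [] ↔ ∀ x ∈ l, x = '*' := by
  simp [rstripStar, List.reverse_eq_nil_iff, List.dropWhile_eq_nil_iff]

theorem rstripStar_cons (c : Char) (r : List Char) :
    rstripStar (c :: r) =
      if (c == '*') && (rstripStar r).isEmpty then [] else c :: rstripStar r := by
  unfold rstripStar
  rw [show (c :: r).reverse = r.reverse ++ [c] from by simp, List.dropWhile_append]
  by_cases hr : (r.reverse.dropWhile (· == '*')) = []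
  · simp only [hr, List.isEmpty_nil, if_true, List.reverse_nil, Bool.and_true]
    by_cases hc : c = '*'
    · have h2 : (c == '*') = true := by simp [hc]
      simp [List.dropWhile, h2]
    · have h2 : (c == '*') = false := by simp [hc]
      simp [List.dropWhile, h2]
  · have h : (r.reverse.dropWhile (· == '*')).isEmpty = false := by
      simpa [List.isEmpty_iff] using hr
    simp [h]

-- flag = 1 phase of A's loop
theorem foldl_flag_one (l : List Char) : ∀ (t p : Int),
    (l.foldl helperStep (t, 1, p)).1 =
      t + (if l.all (· == '*') then 0 else p) + ((rstripStar l).count '*' : Int) := by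
  induction l with
  | nil => intro t p; simp [rstripStar]
  | cons c r ih =>
    intro t p
    by_cases hc : c = '*'
    · subst hc
      have hstep : helperStep (t, 1, p) '*' = (t, 1, p + 1) := by simp [helperStep]
      rw [List.foldl_cons, hstep, ih, rstripStar_cons]
      by_cases hr : ∀ x ∈ r, x = '*'
      · have h1 : r.all (· == '*') = true := by
          simp only [List.all_eq_true]; intro x hx; simp [hr x hx]
        have h2 : rstripStar r = [] := (rstripStar_eq_nil_iff r).mpr hr
        simp [h1, h2]
      · have h1 : r.all (· == '*') = false := by
          simp only [List.all_eq_false]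
          obtain ⟨x, hx, hxne⟩ := not_forall₂.mp hr
          exact ⟨x, hx, by simp [hxne]⟩
        have h2 : (rstripStar r).isEmpty = false := by
          simp only [List.isEmpty_eq_false_iff, ne_eq, rstripStar_eq_nil_iff]
          exact hr
        simp only [h1, Bool.false_eq_true, if_false, h2, Bool.and_false, List.count_cons,
          beq_self_eq_true, if_true, List.all_cons]
        push_cast
        ring
    · have h2 : (c == '*') = false := by simp [hc]
      have hstep : helperStep (t, 1, p) c = (t + p, 1, 0) := by simp [helperStep, h2]
      rw [List.foldl_cons, hstep, ih, rstripStar_cons, h2]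
      have h1 : (c :: r).all (· == '*') = false := by simp [h2]
      simp only [Bool.false_and, Bool.false_eq_true, if_false, List.count_cons, h2,
        ite_self, h1]
      push_cast
      ring

-- flag = 0 phase skips the leading star run
theorem foldl_flag_zero (l : List Char) :
    l.foldl helperStep (0, 0, 0) = (l.dropWhile (· == '*')).foldl helperStep (0, 0, 0) := by
  induction l with
  | nil => rfl
  | cons c r ih =>
    by_cases hc : c = '*'
    · subst hc
      simpa [List.dropWhile, helperStep] using ih
    · have h2 : (c == '*') = false := by simp [hc]
      simp [List.dropWhile, h2, helperStep]

-- A's loop computes: stars of the input with leading and trailing star runs removed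
theorem helper_eq_count (l : List Char) :
    (l.foldl helperStep (0, 0, 0)).1 = ((rstripStar (l.dropWhile (· == '*'))).count '*' : Int) := by
  rw [foldl_flag_zero]
  cases hdw : l.dropWhile (· == '*') with
  | nil => simp [rstripStar]
  | cons c r =>
    have hc : (c == '*') = false := by
      have := List.head?_dropWhile_not (· == '*') l
      simp [hdw] at this
      simpa using this
    have hc' : c ≠ '*' := by simpa using hc
    simp only [List.foldl_cons, helperStep, hc, Bool.and_false, Bool.false_eq_true, if_false]
    rw [show ((0 : Int) + 0, (1 : Int), (0 : Int)) = ((0 : Int), (1 : Int), (0 : Int)) from by norm_num]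
    rw [foldl_flag_one, rstripStar_cons, hc]
    simp [hc']

-- PySem.Chars.count with a single-character needle is List.count
theorem count_go_singleton (a : Char) (l : List Char) : ∀ (fuel acc : Nat), l.length ≤ fuel →
    PySem.Chars.count.go [a] fuel l acc = acc + l.count a := by
  induction l with
  | nil =>
    intro fuel acc _
    cases fuel <;> simp [PySem.Chars.count.go]
  | cons c r ih =>
    intro fuel acc hlen
    cases fuel with
    | zero => simp at hlen
    | succ f =>
      have hf : r.length ≤ f := by simpa using hlen
      by_cases hc : c = a
      · subst hc
        have hpre : [c].isPrefixOf (c :: r) = true := by simp [List.isPrefixOf]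
        rw [PySem.Chars.count.go, if_pos hpre]
        simp only [List.length_cons, List.length_nil, List.drop_succ_cons, List.drop_zero]
        rw [ih f (acc + 1) hf]
        simp
        omega
      · have hpre : [a].isPrefixOf (c :: r) = false := by
          simp [List.isPrefixOf, Ne.symm hc]
        rw [PySem.Chars.count.go, if_neg (by simp [hpre])]
        rw [ih f acc hf]
        simp [hc]

theorem chars_count_singleton (a : Char) (l : List Char) :
    PySem.Chars.count l [a] = l.count a := by
  unfold PySem.Chars.count
  rw [if_neg (by simp)]
  simpa using count_go_singleton a l l.length 0 le_rfl

-- ===== VERDICT (by name: the statement is the Claim_ definition above) =====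
theorem helper_spec : Claim_equal_helper := by
  intro str _
  unfold Spec_helper helper helper_alt
  rw [helper_eq_count]
  show _ = ((PySem.Str.count (PySem.Str.stripChars str "*") "*" : Nat) : Int)
  have hts : ("*" : String).toList = ['*'] := rfl
  rw [PySem.Str.count_eq, PySem.Str.toList_stripChars, hts, chars_count_singleton]
  unfold PySem.Chars.stripChars
  have hp : (fun c => List.contains ['*'] c) = (fun c => c == '*') := by
    funext c
    show (c == '*' || false) = (c == '*')
    simp
  rw [show (rstripStar (str.toList.dropWhile (· == '*'))) =
        ((List.dropWhile (fun c => ['*'].contains c) str.toList).reverse.dropWhile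
          (fun c => ['*'].contains c)).reverse from by
    unfold rstripStar; rw [hp]]
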